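-- pv_equiv track=rewrite | github.com/gut-puncture/Semantic-Gravity-RP | src/dataset_pipeline.py | _common_sense_relation_targets
-- ===== SOURCE A (Python) =====
-- from typing import Dict, List, Optional, Tuple
--
-- def _common_sense_relation_targets(gap: int, counts: Dict[str, int]) -> Dict[str, int]:
--     relation_types = [
--         "UsedFor",
--         "MadeOf",
--         "HasProperty",
--         "HasPart",
--         "AtLocation",
--         "CapableOf",
--         "UsedBy",
--         "Requires",
--         "Contains",
--         "WornOn",
--     ]
--     targets = {rel: 0 for rel in relation_types}
--     for _ in range(gap):
--         rel = min(relation_types, key=lambda r: counts.get(r, 0) + targets[r])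
--         targets[rel] += 1
--     return targets
-- ===== SOURCE B (Python) =====
-- # Water-filling re-implementation: O(k log k) in the bucket count and O(k) in gap
-- # (A's loop is O(gap*k)); same result: raise every bucket to a common fill level,
-- # then hand the q leftover units to the first q buckets at that level in list order.
-- def _common_sense_relation_targets(gap, counts):
--     relation_types = [
--         "UsedFor",
--         "MadeOf",
--         "HasProperty",
--         "HasPart",
--         "AtLocation",
--         "CapableOf",
--         "UsedBy",
--         "Requires",
--         "Contains",
--         "WornOn",
--     ]
--     targets = {rel: 0 for rel in relation_types}
--     if gap <= 0:
--         return targets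
--     base = [counts.get(r, 0) for r in relation_types]
--     s = sorted(base)
--     k = len(s)
--     pre = 0
--     L = 0
--     j = 0
--     for j in range(1, k + 1):
--         pre += s[j - 1]
--         L = (gap + pre) // j
--         if j == k or L < s[j]:
--             break
--     q = gap - (j * L - pre)
--     for r in relation_types:
--         b = counts.get(r, 0)
--         if b <= L:
--             t = L - b
--             if q > 0:
--                 t += 1
--                 q -= 1
--             targets[r] = t
--     return targets
-- ===== Notes on version B (the rewrite author's own statement) =====
-- stated objective: faster
-- what changed: A hands out the gap units one at a time, rescanning all 10 relation buckets for the least-loaded one on every unit; B computes the same allocation in closed form by water-filling: sort the base counts, find the common fill level and leftover with one pass over the sorted list, then emit the allocation in a single pass over the relation list.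
import Mathlib
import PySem

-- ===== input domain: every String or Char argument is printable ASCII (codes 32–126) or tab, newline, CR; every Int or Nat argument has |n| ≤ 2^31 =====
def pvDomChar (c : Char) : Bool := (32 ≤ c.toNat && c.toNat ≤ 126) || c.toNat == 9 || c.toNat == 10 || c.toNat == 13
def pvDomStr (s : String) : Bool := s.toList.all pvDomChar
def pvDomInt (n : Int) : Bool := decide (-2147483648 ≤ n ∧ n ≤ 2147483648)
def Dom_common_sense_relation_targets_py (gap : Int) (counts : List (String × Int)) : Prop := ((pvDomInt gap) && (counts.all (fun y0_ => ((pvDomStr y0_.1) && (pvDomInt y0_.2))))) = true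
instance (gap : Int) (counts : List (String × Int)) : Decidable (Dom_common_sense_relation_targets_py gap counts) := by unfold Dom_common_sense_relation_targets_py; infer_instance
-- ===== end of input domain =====

-- B replaces A's unit-by-unit greedy loop (one argmin scan per unit of `gap`) by a
-- water-filling closed form: sort the base counts, compute the common fill level and the
-- leftover, then emit the whole allocation in one pass over the relation list.

-- ===== PORT A =====
-- the literal `relation_types` list both Pythons declare
def pvRels : List String :=
  ["UsedFor", "MadeOf", "HasProperty", "HasPart", "AtLocation",
   "CapableOf", "UsedBy", "Requires", "Contains", "WornOn"]

def common_sense_relation_targets_py (gap : Int) (counts : List (String × Int)) : List (String × Int) :=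
  let cd : PySem.Dict String Int := ⟨counts⟩
  let targets0 : PySem.Dict String Int := pvRels.foldl (fun d r => d.insert r 0) PySem.Dict.empty
  let final := (PySem.List.pyRange 0 gap).foldl (fun t _ =>
    -- rel = min(relation_types, key=lambda r: counts.get(r, 0) + targets[r]); targets[r] is a
    -- plain subscript but r is always a key of targets, so getD with any default is exact
    match PySem.List.min? pvRels (fun r => cd.getD r 0 + t.getD r 0) with
    | some rel =>
      -- targets[rel] += 1 ; rel is always a key of t, so the none branch is unreachable
      match t.get? rel with
      | some v => t.insert rel (v + 1)
      | none => t
    | none => t  -- unreachable: pvRels ≠ [] so Python's min never raises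
    ) targets0
  final.items

-- ===== PORT B =====
-- the `for j in range(1, k + 1): … break` level search; fuel = remaining iterations,
-- i = Python's j - 1, pre = sum of the i smallest sorted base counts
def pvFindLevel (gap : Int) (s : List Int) (k : Nat) : Nat → Nat → Int → (Nat × Int × Int)
  | 0, i, pre => (i, pre, 0)  -- unreachable: the loop always breaks at j = k at the latest
  | fuel + 1, i, pre =>
    let j := i + 1
    let pre' := pre + s.getD i 0        -- pre += s[j-1]; index always in range
    let L := PySem.Int.floordiv (gap + pre') (j : Int)
    if j = k || decide (L < s.getD j 0) then (j, pre', L)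
    else pvFindLevel gap s k fuel j pre'

def common_sense_relation_targets_py_alt (gap : Int) (counts : List (String × Int)) : List (String × Int) :=
  let cd : PySem.Dict String Int := ⟨counts⟩
  let targets0 : PySem.Dict String Int := pvRels.foldl (fun d r => d.insert r 0) PySem.Dict.empty
  if gap ≤ 0 then targets0.items
  else
    let base := pvRels.map (fun r => cd.getD r 0)
    let s := PySem.List.sorted base id
    let k := s.length
    let res := pvFindLevel gap s k k 0 0
    let j := res.1
    let L := res.2.2
    let q := gap - ((j : Int) * L - res.2.1)
    let final := (pvRels.foldl (fun (st : PySem.Dict String Int × Int) r =>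
      let b := cd.getD r 0
      if b ≤ L then
        let t := L - b
        if 0 < st.2 then (st.1.insert r (t + 1), st.2 - 1) else (st.1.insert r t, st.2)
      else st) (targets0, q)).1
    final.items

-- ===== PRECONDITION & SPEC =====
def Spec_common_sense_relation_targets_py (gap : Int) (counts : List (String × Int)) (out : List (String × Int)) : Prop := out = common_sense_relation_targets_py_alt gap counts
instance (gap : Int) (counts : List (String × Int)) (out : List (String × Int)) : Decidable (Spec_common_sense_relation_targets_py gap counts out) := by unfold Spec_common_sense_relation_targets_py; infer_instance

-- ===== CLAIM (what is proved, stated in full; the proofs are below) =====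
def Claim_equal_common_sense_relation_targets_py : Prop := ∀ (gap : Int) (counts : List (String × Int)), Dom_common_sense_relation_targets_py gap counts → Spec_common_sense_relation_targets_py gap counts (common_sense_relation_targets_py gap counts)

-- ===== LEMMAS AND PROOFS =====

def pvIter {α : Type} (F : α → α) : Nat → α → α
  | 0, t => t
  | n + 1, t => pvIter F n (F t)

lemma pv_foldl_const {α β : Type} (F : α → α) (l : List β) (t : α) :
    l.foldl (fun s _ => F s) t = pvIter F l.length t := by
  induction l generalizing t with
  | nil => rfl
  | cons x xs ih => simp [List.foldl, pvIter, ih]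

lemma pv_find_map_mem {β : Type} (F : String → β) (xs : List String) (r : String) (h : r ∈ xs) :
    List.find? (fun p => p.1 == r) (xs.map fun x => (x, F x)) = some (r, F r) := by
  induction xs with
  | nil => simp at h
  | cons x t ih =>
    rcases List.mem_cons.1 h with h1 | h1
    · subst h1; simp [List.find?]
    · by_cases hx : x = r
      · subst hx; simp [List.find?]
      · simp [List.find?, hx, ih h1]

lemma pv_find_map_not_mem {β : Type} (F : String → β) (xs : List String) (r : String) (h : r ∉ xs) :
    List.find? (fun p => p.1 == r) (xs.map fun x => (x, F x)) = none := by
  induction xs with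
  | nil => rfl
  | cons x t ih =>
    have hx : x ≠ r := fun e => h (e ▸ List.mem_cons_self)
    have ht : r ∉ t := fun e => h (List.mem_cons_of_mem _ e)
    simp [List.find?, hx, ih ht]

def pvMinF {κ : Type} [LT κ] [DecidableLT κ] (key : String → κ) : Option String → String → Option String :=
  fun acc x => match acc with
    | none => some x
    | some m => if key x < key m then some x else some m

lemma pv_min_eq_foldl {κ : Type} [LT κ] [DecidableLT κ] (key : String → κ) (xs : List String) :
    PySem.List.min? xs key = xs.foldl (pvMinF key) none := by
  unfold PySem.List.min?
  congr 1
  funext acc x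
  cases acc <;> rfl

lemma pv_min_foldl_keep (key : String → Int) (v : List String) (c : String)
    (h : ∀ x ∈ v, key c ≤ key x) :
    v.foldl (pvMinF key) (some c) = some c := by
  induction v with
  | nil => rfl
  | cons x t ih =>
    have hx : ¬ key x < key c := not_lt.2 (h x List.mem_cons_self)
    simp only [List.foldl, pvMinF, if_neg hx]
    exact ih (fun y hy => h y (List.mem_cons_of_mem _ hy))

lemma pv_min_foldl_mem (key : String → Int) (u : List String) (c : String) :
    ∃ c' ∈ c :: u, u.foldl (pvMinF key) (some c) = some c' := by
  induction u generalizing c with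
  | nil => exact ⟨c, List.mem_cons_self, rfl⟩
  | cons x t ih =>
    simp only [List.foldl, pvMinF]
    by_cases hx : key x < key c
    · simp only [if_pos hx]
      obtain ⟨c', hc', he⟩ := ih x
      refine ⟨c', ?_, he⟩
      rcases List.mem_cons.1 hc' with h|h
      · subst h; exact List.mem_cons_of_mem _ List.mem_cons_self
      · exact List.mem_cons_of_mem _ (List.mem_cons_of_mem _ h)
    · simp only [if_neg hx]
      obtain ⟨c', hc', he⟩ := ih c
      refine ⟨c', ?_, he⟩
      rcases List.mem_cons.1 hc' with h|h
      · subst h; exact List.mem_cons_self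
      · exact List.mem_cons_of_mem _ (List.mem_cons_of_mem _ h)

lemma pv_min_first (key : String → Int) (u v : List String) (m : String)
    (hu : ∀ x ∈ u, key m < key x) (hv : ∀ x ∈ v, key m ≤ key x) :
    PySem.List.min? (u ++ m :: v) key = some m := by
  rw [pv_min_eq_foldl]
  cases u with
  | nil =>
    simp only [List.nil_append, List.foldl]
    show v.foldl (pvMinF key) (pvMinF key none m) = some m
    exact pv_min_foldl_keep key v m hv
  | cons x t =>
    simp only [List.cons_append, List.foldl, List.foldl_append]
    obtain ⟨c', hc', he⟩ := pv_min_foldl_mem key t x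
    show List.foldl (pvMinF key) (pvMinF key (List.foldl (pvMinF key) (pvMinF key none x) t) m) v = some m
    have h0 : pvMinF key none x = some x := rfl
    rw [h0, he]
    have hlt : key m < key c' := by
      apply hu
      rcases List.mem_cons.1 hc' with h|h
      · subst h; exact List.mem_cons_self
      · exact List.mem_cons_of_mem _ h
    have : pvMinF key (some c') m = some m := by simp [pvMinF, hlt]
    rw [this]
    exact pv_min_foldl_keep key v m hv

lemma pv_sum_map_sub (L : Int) (t : List Int) :
    (t.map (fun x => L - x)).sum = (t.length : Int) * L - t.sum := by
  induction t with
  | nil => simp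
  | cons x xs ih => simp [ih]; push_cast; ring

def pvPlain (b : String → Int) (L : Int) (r : String) : String × Int :=
  (r, if b r ≤ L then L - b r else 0)

def pvEligB (b : String → Int) (L : Int) (r : String) : Bool :=
  decide (b r ≤ L)

def pvCost (b : String → Int) (L : Int) : Int :=
  (pvRels.map (fun r => max (L - b r) 0)).sum

def pvElig (b : String → Int) (L : Int) : Nat :=
  pvRels.countP (pvEligB b L)

def pvValid (b : String → Int) (n L q : Int) : Prop :=
  pvCost b L + q = n ∧ 0 ≤ q ∧ q < (pvElig b L : Int)

def pvPieces (b : String → Int) (L : Int) : List String → Int → List (String × Int)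
  | [], _ => []
  | r :: t, q =>
    if b r ≤ L then
      if 0 < q then (r, L - b r + 1) :: pvPieces b L t (q - 1)
      else (r, L - b r) :: pvPieces b L t q
    else (r, 0) :: pvPieces b L t q

lemma pv_countP_sum (b : String → Int) (L : Int) (xs : List String) :
    ((xs.map (fun r => max (L + 1 - b r) 0)).sum : Int)
      = (xs.map (fun r => max (L - b r) 0)).sum + (xs.countP (pvEligB b L) : Int) := by
  induction xs with
  | nil => simp
  | cons x t ih =>
    by_cases h : b x ≤ L
    · have hp : pvEligB b L x = true := by simp [pvEligB, h]
      simp only [List.map_cons, List.sum_cons, List.countP_cons, hp, if_pos, ih]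
      have h1 : max (L + 1 - b x) 0 = L + 1 - b x := max_eq_left (by omega)
      have h2 : max (L - b x) 0 = L - b x := max_eq_left (by omega)
      rw [h1, h2]
      push_cast
      ring
    · have hp : pvEligB b L x = false := by simp [pvEligB, h]
      simp only [List.map_cons, List.sum_cons, List.countP_cons, hp, ih]
      have h1 : max (L + 1 - b x) 0 = 0 := max_eq_right (by omega)
      have h2 : max (L - b x) 0 = 0 := max_eq_right (by omega)
      rw [h1, h2]
      push_cast
      ring

lemma pv_cost_succ (b : String → Int) (L : Int) :
    pvCost b (L + 1) = pvCost b L + (pvElig b L : Int) := by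
  unfold pvCost pvElig
  exact pv_countP_sum b L pvRels

lemma pv_cost_mono (b : String → Int) {L L' : Int} (h : L ≤ L') :
    pvCost b L ≤ pvCost b L' := by
  unfold pvCost
  apply List.sum_le_sum
  intro r _
  exact max_le_max (by omega) le_rfl

lemma pv_base_level_aux (b : String → Int) (xs : List String) (hne : xs ≠ []) :
    ∃ L, (xs.map (fun r => max (L - b r) 0)).sum = 0 ∧ 0 < xs.countP (pvEligB b L) := by
  induction xs with
  | nil => simp at hne
  | cons x t ih =>
    cases t with
    | nil =>
      refine ⟨b x, by simp, by simp [List.countP_cons, pvEligB]⟩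
    | cons y u =>
      obtain ⟨L, hc, he⟩ := ih (by simp)
      refine ⟨min L (b x), ?_, ?_⟩
      · have hx : max (min L (b x) - b x) 0 = 0 := max_eq_right (by omega)
        rw [List.map_cons, List.sum_cons, hx, zero_add]
        have hle : ((y :: u).map (fun r => max (min L (b x) - b r) 0)).sum
            ≤ ((y :: u).map (fun r => max (L - b r) 0)).sum := by
          apply List.sum_le_sum
          intro r _
          exact max_le_max (by omega) le_rfl
        rw [hc] at hle
        have hge : 0 ≤ ((y :: u).map (fun r => max (min L (b x) - b r) 0)).sum := by
          apply List.sum_nonneg; intro z hz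
          simp only [List.mem_map] at hz
          obtain ⟨r, _, hr⟩ := hz
          rw [← hr]; exact le_max_right _ _
        omega
      · by_cases hbx : b x ≤ L
        · have hx : pvEligB b (min L (b x)) x = true := by
            simp [pvEligB, le_min_iff, hbx]
          rw [List.countP_cons, hx]
          simp
        · have hmin : min L (b x) = L := min_eq_left (by omega)
          rw [hmin, List.countP_cons]
          split <;> omega

lemma pv_base_level (b : String → Int) :
    ∃ L, pvCost b L = 0 ∧ 0 < pvElig b L := by
  obtain ⟨L, h1, h2⟩ := pv_base_level_aux b pvRels (by decide)
  exact ⟨L, h1, h2⟩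

lemma pv_valid_unique (b : String → Int) {n L q L' q' : Int}
    (h : pvValid b n L q) (h' : pvValid b n L' q') : L = L' ∧ q = q' := by
  obtain ⟨hc, hq0, hqe⟩ := h
  obtain ⟨hc', hq0', hqe'⟩ := h'
  have key : ∀ {M M' Q Q' : Int}, pvCost b M + Q = n → 0 ≤ Q → Q < (pvElig b M : Int) →
      pvCost b M' + Q' = n → 0 ≤ Q' → ¬ M < M' := by
    intro M M' Q Q' a1 a2 a3 a4 a5 hlt
    have e1 : pvCost b (M + 1) = pvCost b M + (pvElig b M : Int) := pv_cost_succ b M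
    have e2 : pvCost b (M + 1) ≤ pvCost b M' := pv_cost_mono b (by omega)
    omega
  have hLL : L = L' := by
    rcases lt_trichotomy L L' with h1 | h1 | h1
    · exact absurd h1 (key hc hq0 hqe hc' hq0')
    · exact h1
    · exact absurd h1 (key hc' hq0' hqe' hc hq0)
  refine ⟨hLL, ?_⟩
  rw [hLL] at hc
  omega

lemma pv_pieces_zero (b : String → Int) (L : Int) (v : List String) :
    pvPieces b L v 0 = v.map (pvPlain b L) := by
  induction v with
  | nil => rfl
  | cons x t ih =>
    by_cases h : b x ≤ L <;> simp [pvPieces, h, ih, pvPlain]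

lemma pv_pieces_split (b : String → Int) (L : Int) (u v : List String) :
    pvPieces b L (u ++ v) (u.countP (pvEligB b L) : Int)
      = u.map (pvPlain b (L + 1)) ++ v.map (pvPlain b L) := by
  induction u with
  | nil => simpa using pv_pieces_zero b L v
  | cons x t ih =>
    by_cases h : b x ≤ L
    · have hc : (x :: t).countP (pvEligB b L) = t.countP (pvEligB b L) + 1 := by
        simp [List.countP_cons, pvEligB, h]
      rw [hc]
      have hpos : (0 : Int) < ((t.countP (pvEligB b L) + 1 : Nat) : Int) := by positivity
      simp only [List.cons_append, pvPieces, if_pos h, if_pos hpos]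
      have harg : ((t.countP (pvEligB b L) + 1 : Nat) : Int) - 1 = (t.countP (pvEligB b L) : Int) := by
        push_cast; ring
      rw [harg, ih]
      have hval : pvPlain b (L + 1) x = (x, L - b x + 1) := by
        simp [pvPlain, show b x ≤ L + 1 by omega]; ring
      simp [hval]
    · have hc : (x :: t).countP (pvEligB b L) = t.countP (pvEligB b L) := by
        simp [List.countP_cons, pvEligB, h]
      rw [hc]
      simp only [List.cons_append, pvPieces, if_neg h]
      rw [ih]
      have hval : pvPlain b (L + 1) x = (x, 0) := by
        by_cases h2 : b x ≤ L + 1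
        · simp [pvPlain, h2]; omega
        · simp [pvPlain, h2]
      simp [hval]

lemma pv_first_elig (p : String → Bool) (v : List String) (h : 0 < v.countP p) :
    ∃ v₁ m v₂, v = v₁ ++ m :: v₂ ∧ p m = true ∧ ∀ x ∈ v₁, p x = false := by
  induction v with
  | nil => simp at h
  | cons x t ih =>
    by_cases hx : p x = true
    · exact ⟨[], x, t, by simp, hx, by simp⟩
    · have hx' : p x = false := by simp at hx; exact hx
      have : 0 < t.countP p := by
        simp [List.countP_cons, hx'] at h ⊢; omega
      obtain ⟨v₁, m, v₂, he, hm, hv₁⟩ := ih this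
      refine ⟨x :: v₁, m, v₂, by simp [he], hm, ?_⟩
      intro y hy
      rcases List.mem_cons.1 hy with h1 | h1
      · subst h1; exact hx'
      · exact hv₁ y h1

def pvB (counts : List (String × Int)) (r : String) : Int :=
  PySem.Dict.getD ⟨counts⟩ r 0

lemma pv_contains_of_mid (A B : List (String × Int)) (r : String) (w : Int) :
    (PySem.Dict.mk (A ++ (r, w) :: B) : PySem.Dict String Int).contains r = true := by
  unfold PySem.Dict.contains
  simp only [PySem.Dict.items]
  rw [List.any_eq_true]
  exact ⟨(r, w), by simp, by simp⟩

lemma pv_insert_present (A B : List (String × Int)) (r : String) (w v : Int)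
    (hA : ∀ p ∈ A, p.1 ≠ r) (hB : ∀ p ∈ B, p.1 ≠ r) :
    (PySem.Dict.mk (A ++ (r, w) :: B) : PySem.Dict String Int).insert r v
      = ⟨A ++ (r, v) :: B⟩ := by
  unfold PySem.Dict.insert
  rw [if_pos (pv_contains_of_mid A B r w)]
  have hAmap : A.map (fun p => if p.1 = r then (r, v) else p) = A :=
    (List.map_congr_left (fun p hp => if_neg (hA p hp))).trans (List.map_id A)
  have hBmap : B.map (fun p => if p.1 = r then (r, v) else p) = B :=
    (List.map_congr_left (fun p hp => if_neg (hB p hp))).trans (List.map_id B)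
  simp [hAmap, hBmap]

lemma pv_B_fold (counts : List (String × Int)) (L : Int) (xs : List String)
    (dpref : List (String × Int)) (q : Int)
    (hdis : ∀ p ∈ dpref, p.1 ∉ xs) (hnd : xs.Nodup) :
    ((xs.foldl (fun (st : PySem.Dict String Int × Int) r =>
      let b := PySem.Dict.getD (⟨counts⟩ : PySem.Dict String Int) r 0
      if b ≤ L then
        let t := L - b
        if 0 < st.2 then (st.1.insert r (t + 1), st.2 - 1) else (st.1.insert r t, st.2)
      else st) (⟨dpref ++ xs.map (fun r => (r, (0 : Int)))⟩, q))).1.items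
      = dpref ++ pvPieces (pvB counts) L xs q := by
  induction xs generalizing dpref q with
  | nil => simp [pvPieces]
  | cons r t ih =>
    have hrt : r ∉ t := (List.nodup_cons.1 hnd).1
    have hndt : t.Nodup := (List.nodup_cons.1 hnd).2
    have hA : ∀ p ∈ dpref, p.1 ≠ r := fun p hp e => hdis p hp (e ▸ List.mem_cons_self)
    have hB : ∀ p ∈ t.map (fun x => (x, (0:Int))), p.1 ≠ r := by
      intro p hp e
      simp only [List.mem_map] at hp
      obtain ⟨x, hx, he⟩ := hp
      exact hrt (by rw [← e, ← he]; exact hx)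
    have hdis' : ∀ w : Int, ∀ p ∈ dpref ++ [(r, w)], p.1 ∉ t := by
      intro w p hp
      rcases List.mem_append.1 hp with h | h
      · exact fun hm => hdis p h (List.mem_cons_of_mem _ hm)
      · simp at h; subst h; exact hrt
    simp only [List.map_cons, List.foldl_cons]
    by_cases hb : PySem.Dict.getD (⟨counts⟩ : PySem.Dict String Int) r 0 ≤ L
    · by_cases hq : 0 < q
      · simp only [if_pos hb, if_pos hq]
        rw [pv_insert_present dpref (t.map (fun x => (x, (0:Int)))) r 0 _ hA hB]
        rw [show dpref ++ (r, L - PySem.Dict.getD (⟨counts⟩ : PySem.Dict String Int) r 0 + 1) :: t.map (fun x => (x, (0:Int)))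
              = (dpref ++ [(r, L - PySem.Dict.getD (⟨counts⟩ : PySem.Dict String Int) r 0 + 1)]) ++ t.map (fun x => (x, (0:Int))) by simp]
        rw [ih _ _ (hdis' _) hndt]
        have : pvPieces (pvB counts) L (r :: t) q
            = (r, L - pvB counts r + 1) :: pvPieces (pvB counts) L t (q - 1) := by
          simp only [pvPieces]
          rw [if_pos (show pvB counts r ≤ L from hb), if_pos hq]
        rw [this]
        simp [pvB]
      · simp only [if_pos hb, if_neg hq]
        rw [pv_insert_present dpref (t.map (fun x => (x, (0:Int)))) r 0 _ hA hB]
        rw [show dpref ++ (r, L - PySem.Dict.getD (⟨counts⟩ : PySem.Dict String Int) r 0) :: t.map (fun x => (x, (0:Int)))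
              = (dpref ++ [(r, L - PySem.Dict.getD (⟨counts⟩ : PySem.Dict String Int) r 0)]) ++ t.map (fun x => (x, (0:Int))) by simp]
        rw [ih _ _ (hdis' _) hndt]
        have : pvPieces (pvB counts) L (r :: t) q
            = (r, L - pvB counts r) :: pvPieces (pvB counts) L t q := by
          simp only [pvPieces]
          rw [if_pos (show pvB counts r ≤ L from hb), if_neg hq]
        rw [this]
        simp [pvB]
    · simp only [if_neg hb]
      rw [show dpref ++ (r, (0:Int)) :: t.map (fun x => (x, (0:Int)))
            = (dpref ++ [(r, (0:Int))]) ++ t.map (fun x => (x, (0:Int))) by simp]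
      rw [ih _ _ (hdis' _) hndt]
      have : pvPieces (pvB counts) L (r :: t) q
          = (r, 0) :: pvPieces (pvB counts) L t q := by
        simp only [pvPieces]
        rw [if_neg (show ¬ pvB counts r ≤ L from hb)]
      rw [this]
      simp

lemma pv_findLevel_spec (gap : Int) (s : List Int)
    (fuel i : Nat) (pre : Int) (hik : i + fuel = s.length) (hi : i < s.length)
    (hpre : pre = (s.take i).sum) (hlow : (i : Int) * s.getD i 0 ≤ gap + pre) :
    ∃ j pre' L, pvFindLevel gap s s.length fuel i pre = (j, pre', L) ∧
      1 ≤ j ∧ j ≤ s.length ∧ pre' = (s.take j).sum ∧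
      L = PySem.Int.floordiv (gap + pre') (j : Int) ∧
      (j : Int) * s.getD (j - 1) 0 ≤ gap + pre' ∧
      (j = s.length ∨ L < s.getD j 0) := by
  induction fuel generalizing i pre with
  | zero => omega
  | succ fuel ih =>
    have htake : (s.take (i + 1)).sum = (s.take i).sum + s.getD i 0 := by
      rw [List.take_succ]
      rw [List.sum_append]
      congr 1
      have : s[i]? = some s[i] := List.getElem?_eq_getElem hi
      simp [this, List.getD, hi]
    subst hpre
    simp only [pvFindLevel]
    set L : Int := PySem.Int.floordiv (gap + ((s.take i).sum + s.getD i 0)) ((i + 1 : Nat) : Int) with hL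
    by_cases h1 : i + 1 = s.length
    · rw [if_pos (by rw [decide_eq_true h1, Bool.true_or])]
      refine ⟨i + 1, (s.take i).sum + s.getD i 0, L, rfl, by omega, by omega, by omega, rfl, ?_, Or.inl h1⟩
      have : (i + 1 : Nat) - 1 = i := by omega
      rw [this]
      push_cast
      nlinarith [hlow]
    · by_cases h2 : L < s.getD (i + 1) 0
      · rw [if_pos (by rw [decide_eq_true h2, Bool.or_true])]
        refine ⟨i + 1, (s.take i).sum + s.getD i 0, L, rfl, by omega, by omega, by omega, rfl, ?_, Or.inr h2⟩
        have : (i + 1 : Nat) - 1 = i := by omega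
        rw [this]
        push_cast
        nlinarith [hlow]
      · rw [if_neg (by simp only [Bool.or_eq_true, decide_eq_true_eq]; rintro (h | h); exact h1 h; exact h2 h)]
        have hlow' : ((i + 1 : Nat) : Int) * s.getD (i + 1) 0 ≤ gap + ((s.take i).sum + s.getD i 0) := by
          have hle : s.getD (i + 1) 0 ≤ L := not_lt.1 h2
          rw [hL] at hle
          have := (PySem.Int.le_floordiv_iff_mul_le (a := gap + ((s.take i).sum + s.getD i 0))
            (b := ((i + 1 : Nat) : Int)) (q := s.getD (i + 1) 0) (by positivity)).1 hle
          linarith [this]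
        exact ih (i + 1) ((s.take i).sum + s.getD i 0) (by omega) (by omega) (by omega) hlow'

lemma pv_sorted_le (s : List Int) (hpw : List.Pairwise (fun a b : Int => a ≤ b) s)
    {m n : Nat} (hmn : m ≤ n) (hn : n < s.length) : s[m]'(by omega) ≤ s[n] := by
  rcases Nat.lt_or_ge m n with h | h
  · exact List.pairwise_iff_getElem.1 hpw m n (by omega) hn h
  · have : m = n := by omega
    subst this; rfl

lemma pv_B_valid (counts : List (String × Int)) (gap : Int) (hgap : 0 < gap) :
    ∃ j pre L, pvFindLevel gap (PySem.List.sorted (pvRels.map (pvB counts)) id)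
        (PySem.List.sorted (pvRels.map (pvB counts)) id).length
        (PySem.List.sorted (pvRels.map (pvB counts)) id).length 0 0 = (j, pre, L) ∧
      pvValid (pvB counts) gap L (gap - ((j : Int) * L - pre)) := by
  set b := pvB counts with hb
  set s := PySem.List.sorted (pvRels.map b) id with hs
  have hperm : s.Perm (pvRels.map b) := PySem.List.sorted_perm _ _ _
  have hlen : s.length = 10 := by
    rw [hperm.length_eq, List.length_map]
    rfl
  have hpw : List.Pairwise (fun a c : Int => a ≤ c) s := PySem.List.sorted_pairwise _ _
  obtain ⟨j, pre', L, heq, hj1, hjk, hpre', hLdef, hlow, hbrk⟩ :=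
    pv_findLevel_spec gap s s.length 0 0 (by omega) (by omega) (by simp) (by simp; omega)
  refine ⟨j, pre', L, heq, ?_⟩
  -- s[j-1] ≤ L
  have hj1' : j - 1 < s.length := by omega
  have hgetD : s.getD (j - 1) 0 = s[j - 1] := List.getD_eq_getElem s 0 hj1'
  have hjL : s[j - 1] ≤ L := by
    rw [hLdef]
    rw [PySem.Int.le_floordiv_iff_mul_le (by positivity)]
    rw [← hgetD]
    linarith [hlow]
  -- every element of take j is ≤ L; every element of drop j is > L
  have htakeLe : ∀ x ∈ s.take j, x ≤ L := by
    intro x hx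
    rw [List.mem_take_iff_getElem] at hx
    obtain ⟨m, hm, rfl⟩ := hx
    exact le_trans (pv_sorted_le s hpw (by omega) hj1') hjL
  have hdropGt : ∀ x ∈ s.drop j, L < x := by
    intro x hx
    rcases hbrk with hcase | hcase
    · rw [hcase, List.drop_length] at hx
      simp at hx
    · have hjs : j < s.length := by
        rcases Nat.lt_or_ge j s.length with h | h
        · exact h
        · exfalso
          have hx' := hx
          rw [List.drop_eq_nil_of_le h] at hx'
          simp at hx'
      rw [List.mem_iff_getElem] at hx
      obtain ⟨m, hm, hxeq⟩ := hx
      have hms : j + m < s.length := by rw [List.length_drop] at hm; omega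
      have hxe2 : x = s[j + m]'hms := by
        rw [← hxeq, List.getElem_drop]
      have h1 : s.getD j 0 = s[j] := List.getD_eq_getElem s 0 hjs
      have h2 : s[j] ≤ s[j + m]'hms := pv_sorted_le s hpw (by omega) hms
      rw [h1] at hcase
      rw [hxe2]
      omega
  -- cost = j * L - pre'
  have hcost : pvCost b L = (j : Int) * L - pre' := by
    unfold pvCost
    have h1 : (pvRels.map fun r => max (L - b r) 0) = (pvRels.map b).map (fun x => max (L - x) 0) := by
      rw [List.map_map]
      rfl
    rw [h1, ← (hperm.map (fun x => max (L - x) 0)).sum_eq]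
    conv_lhs => rw [← List.take_append_drop j s]
    rw [List.map_append, List.sum_append]
    have htk : ((s.take j).map (fun x => max (L - x) 0)).sum = (j : Int) * L - pre' := by
      have : (s.take j).map (fun x => max (L - x) 0) = (s.take j).map (fun x => L - x) :=
        List.map_congr_left (fun x hx => max_eq_left (by have := htakeLe x hx; omega))
      rw [this, pv_sum_map_sub]
      rw [List.length_take, min_eq_left hjk, hpre']
    have hdr : ((s.drop j).map (fun x => max (L - x) 0)).sum = 0 := by
      have : (s.drop j).map (fun x => max (L - x) 0) = (s.drop j).map (fun _ => (0 : Int)) :=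
        List.map_congr_left (fun x hx => max_eq_right (by have := hdropGt x hx; omega))
      rw [this, List.map_const']
      simp
    rw [htk, hdr, add_zero]
  -- elig = j
  have helig : pvElig b L = j := by
    unfold pvElig
    have h1 : pvRels.countP (pvEligB b L) = (pvRels.map b).countP (fun x => decide (x ≤ L)) := by
      rw [List.countP_map]
      rfl
    rw [h1, ← hperm.countP_eq]
    conv_lhs => rw [← List.take_append_drop j s]
    rw [List.countP_append]
    have htk : (s.take j).countP (fun x => decide (x ≤ L)) = j := by
      have h2 : (s.take j).countP (fun x => decide (x ≤ L)) = (s.take j).length := by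
        rw [List.countP_eq_length]
        intro x hx
        simpa using htakeLe x hx
      rw [h2, List.length_take, min_eq_left hjk]
    have hdr : (s.drop j).countP (fun x => decide (x ≤ L)) = 0 := by
      rw [List.countP_eq_zero]
      intro x hx
      simpa using (hdropGt x hx)
    omega
  -- q bounds
  have hq0 : (j : Int) * L ≤ gap + pre' := by
    have : L ≤ PySem.Int.floordiv (gap + pre') (j : Int) := le_of_eq hLdef
    rw [PySem.Int.le_floordiv_iff_mul_le (by positivity)] at this
    linarith [this]
  have hq1 : gap + pre' < (j : Int) * (L + 1) := by
    have : PySem.Int.floordiv (gap + pre') (j : Int) < L + 1 := by omega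
    rw [PySem.Int.floordiv_lt_iff_lt_mul (by positivity)] at this
    linarith [this]
  refine ⟨?_, ?_, ?_⟩
  · rw [hcost]; ring
  · omega
  · rw [helig]
    have : (j : Int) * L + (gap - ((j : Int) * L - pre')) < (j : Int) * (L + 1) → gap - ((j : Int) * L - pre') < j := by
      intro h
      nlinarith [h]
    omega

def pvPV (b : String → Int) (L : Int) (r : String) : Int :=
  if b r ≤ L then L - b r else 0

lemma pv_plain_eq (b : String → Int) (L : Int) :
    pvPlain b L = fun r => (r, pvPV b L r) := rfl

lemma pv_get_append_left (F : String → Int) (u : List String)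
    (tail : List (String × Int)) (r : String) (hr : r ∈ u) :
    (PySem.Dict.mk ((u.map fun x => (x, F x)) ++ tail) : PySem.Dict String Int).get? r = some (F r) := by
  unfold PySem.Dict.get?
  simp only [PySem.Dict.items]
  rw [List.find?_append, pv_find_map_mem F u r hr]
  rfl

lemma pv_get_append_right (F G : String → Int) (u v : List String) (r : String)
    (hru : r ∉ u) (hrv : r ∈ v) :
    (PySem.Dict.mk ((u.map fun x => (x, F x)) ++ (v.map fun x => (x, G x))) : PySem.Dict String Int).get? r = some (G r) := by
  unfold PySem.Dict.get?
  simp only [PySem.Dict.items]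
  rw [List.find?_append, pv_find_map_not_mem F u r hru, pv_find_map_mem G v r hrv]
  rfl

def pvStepA (counts : List (String × Int)) (t : PySem.Dict String Int) : PySem.Dict String Int :=
  match PySem.List.min? pvRels (fun r => PySem.Dict.getD ⟨counts⟩ r 0 + t.getD r 0) with
  | some rel =>
    match t.get? rel with
    | some v => t.insert rel (v + 1)
    | none => t
  | none => t

lemma pv_stepA (counts : List (String × Int)) (n L : Int) (u v : List String)
    (huv : pvRels = u ++ v)
    (hval : pvValid (pvB counts) n L (u.countP (pvEligB (pvB counts) L) : Int)) :
    ∃ L' u' v', pvRels = u' ++ v' ∧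
      pvValid (pvB counts) (n + 1) L' (u'.countP (pvEligB (pvB counts) L') : Int) ∧
      pvStepA counts ⟨u.map (pvPlain (pvB counts) (L + 1)) ++ v.map (pvPlain (pvB counts) L)⟩
        = ⟨u'.map (pvPlain (pvB counts) (L' + 1)) ++ v'.map (pvPlain (pvB counts) L')⟩ := by
  set b := pvB counts with hbdef
  obtain ⟨hc, hq0, hqe⟩ := hval
  have hndR : pvRels.Nodup := by decide
  have hnd : (u ++ v).Nodup := huv ▸ hndR
  have hdisj : ∀ a ∈ u, a ∉ v := fun a ha hav => (List.disjoint_of_nodup_append hnd) ha hav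
  have hndv : v.Nodup := hnd.of_append_right
  -- total eligibility decomposes over the split
  have heligS : pvElig b L = u.countP (pvEligB b L) + v.countP (pvEligB b L) := by
    unfold pvElig
    rw [huv, List.countP_append]
  have hcv : 0 < v.countP (pvEligB b L) := by
    have h1 : u.countP (pvEligB b L) < pvElig b L := by exact_mod_cast hqe
    omega
  obtain ⟨v1, m, v2, hv, hm, hv1⟩ := pv_first_elig (pvEligB b L) v hcv
  have hmL : b m ≤ L := of_decide_eq_true hm
  have hmv : m ∈ v := by rw [hv]; simp
  have hmu : m ∉ u := fun h => hdisj m h hmv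
  have hmv1 : m ∉ v1 := by
    have : (v1 ++ m :: v2).Nodup := hv ▸ hndv
    have h2 := (List.nodup_append.1 this).2.2
    intro hmm
    exact h2 m hmm m List.mem_cons_self rfl
  have hmv2 : m ∉ v2 := by
    have : (v1 ++ m :: v2).Nodup := hv ▸ hndv
    exact (List.nodup_cons.1 (List.nodup_append.1 this).2.1).1
  -- the state dict and its key function
  set T : PySem.Dict String Int :=
    ⟨u.map (pvPlain b (L + 1)) ++ v.map (pvPlain b L)⟩ with hT
  have hgetu : ∀ x ∈ u, T.get? x = some (pvPV b (L + 1) x) := by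
    intro x hx
    rw [hT, pv_plain_eq, pv_plain_eq]
    exact pv_get_append_left _ u _ x hx
  have hgetv : ∀ x ∈ v, T.get? x = some (pvPV b L x) := by
    intro x hx
    rw [hT, pv_plain_eq, pv_plain_eq]
    exact pv_get_append_right _ _ u v x (fun h => hdisj x h hx) hx
  have hKEY : ∀ x r0, T.get? x = some r0 → PySem.Dict.getD (⟨counts⟩ : PySem.Dict String Int) x 0 + T.getD x 0 = b x + r0 := by
    intro x r0 h
    unfold PySem.Dict.getD
    rw [h, hbdef]
    rfl
  have key_m : PySem.Dict.getD (⟨counts⟩ : PySem.Dict String Int) m 0 + T.getD m 0 = L := by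
    rw [hKEY m _ (hgetv m hmv)]
    unfold pvPV
    rw [if_pos hmL]
    ring
  have key_u : ∀ x ∈ u, L < PySem.Dict.getD (⟨counts⟩ : PySem.Dict String Int) x 0 + T.getD x 0 := by
    intro x hx
    rw [hKEY x _ (hgetu x hx)]
    unfold pvPV
    split_ifs with h <;> omega
  have key_v1 : ∀ x ∈ v1, L < PySem.Dict.getD (⟨counts⟩ : PySem.Dict String Int) x 0 + T.getD x 0 := by
    intro x hx
    have hxv : x ∈ v := by rw [hv]; simp [hx]
    rw [hKEY x _ (hgetv x hxv)]
    have : ¬ b x ≤ L := by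
      have := hv1 x hx
      simpa [pvEligB] using this
    unfold pvPV
    rw [if_neg this]
    omega
  have key_v2 : ∀ x ∈ v2, L ≤ PySem.Dict.getD (⟨counts⟩ : PySem.Dict String Int) x 0 + T.getD x 0 := by
    intro x hx
    have hxv : x ∈ v := by rw [hv]; simp [hx]
    rw [hKEY x _ (hgetv x hxv)]
    unfold pvPV
    split_ifs with h <;> omega
  have hmin : PySem.List.min? pvRels (fun r => PySem.Dict.getD (⟨counts⟩ : PySem.Dict String Int) r 0 + T.getD r 0) = some m := by
    rw [huv, hv, show u ++ (v1 ++ m :: v2) = (u ++ v1) ++ m :: v2 by simp]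
    apply pv_min_first
    · intro x hx
      rw [key_m]
      rcases List.mem_append.1 hx with h | h
      · exact key_u x h
      · exact key_v1 x h
    · intro x hx
      rw [key_m]
      exact key_v2 x hx
  have hgetm : T.get? m = some (L - b m) := by
    rw [hgetv m hmv]
    unfold pvPV
    rw [if_pos hmL]
  -- the insert
  have hvmap : v.map (pvPlain b L)
      = v1.map (pvPlain b L) ++ (m, L - b m) :: v2.map (pvPlain b L) := by
    rw [hv, List.map_append, List.map_cons]
    have : pvPlain b L m = (m, L - b m) := by
      unfold pvPlain
      rw [if_pos hmL]
    rw [this]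
  have hkeysA : ∀ p ∈ u.map (pvPlain b (L + 1)) ++ v1.map (pvPlain b L), p.1 ≠ m := by
    intro p hp
    rcases List.mem_append.1 hp with h | h
    · obtain ⟨x, hx, he⟩ := List.mem_map.1 h
      rw [← he]
      unfold pvPlain
      intro e
      exact hmu (e ▸ hx)
    · obtain ⟨x, hx, he⟩ := List.mem_map.1 h
      rw [← he]
      unfold pvPlain
      intro e
      exact hmv1 (e ▸ hx)
  have hkeysB : ∀ p ∈ v2.map (pvPlain b L), p.1 ≠ m := by
    intro p hp
    obtain ⟨x, hx, he⟩ := List.mem_map.1 hp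
    rw [← he]
    unfold pvPlain
    intro e
    exact hmv2 (e ▸ hx)
  have hins : T.insert m (L - b m + 1)
      = ⟨(u.map (pvPlain b (L + 1)) ++ v1.map (pvPlain b L))
          ++ (m, L - b m + 1) :: v2.map (pvPlain b L)⟩ := by
    rw [hT, hvmap, show u.map (pvPlain b (L+1)) ++ (v1.map (pvPlain b L) ++ (m, L - b m) :: v2.map (pvPlain b L)) = (u.map (pvPlain b (L+1)) ++ v1.map (pvPlain b L)) ++ (m, L - b m) :: v2.map (pvPlain b L) by simp]
    exact pv_insert_present _ _ m _ _ hkeysA hkeysB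
  have hstep : pvStepA counts T
      = ⟨(u.map (pvPlain b (L + 1)) ++ v1.map (pvPlain b L))
          ++ (m, L - b m + 1) :: v2.map (pvPlain b L)⟩ := by
    unfold pvStepA
    simp only [hmin, hgetm]
    exact hins
  -- v1 entries look the same at level L and L + 1
  have hv1map : v1.map (pvPlain b L) = v1.map (pvPlain b (L + 1)) := by
    apply List.map_congr_left
    intro x hx
    have hxe : ¬ b x ≤ L := by
      have := hv1 x hx
      simpa [pvEligB] using this
    unfold pvPlain
    rw [if_neg hxe]
    by_cases h2 : b x ≤ L + 1
    · rw [if_pos h2]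
      have : L + 1 - b x = 0 := by omega
      rw [this]
    · rw [if_neg h2]
  have hmmap : (m, L - b m + 1) = pvPlain b (L + 1) m := by
    unfold pvPlain
    rw [if_pos (by omega : b m ≤ L + 1)]
    congr 1
    ring
  have hcntv1 : v1.countP (pvEligB b L) = 0 :=
    List.countP_eq_zero.2 (fun x hx => by simp [hv1 x hx])
  by_cases hcase : u.countP (pvEligB b L) + 1 < pvElig b L
  · -- still at level L: the bumped prefix grows by v1 and m
    refine ⟨L, u ++ v1 ++ [m], v2, by rw [huv, hv]; simp, ?_, ?_⟩
    · have hcnt : (u ++ v1 ++ [m]).countP (pvEligB b L) = u.countP (pvEligB b L) + 1 := by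
        rw [List.countP_append, List.countP_append, hcntv1]
        simp [List.countP_cons, hm]
      rw [hcnt]
      refine ⟨?_, by positivity, ?_⟩
      · push_cast
        omega
      · exact_mod_cast hcase
    · rw [hstep]
      congr 1
      rw [List.map_append, List.map_append, List.map_cons, List.map_nil, hv1map, hmmap]
      simp
  · -- the level fills up: everything is at L + 1, no leftovers
    have hfull : u.countP (pvEligB b L) + 1 = pvElig b L := by
      have h1 : u.countP (pvEligB b L) < pvElig b L := by exact_mod_cast hqe
      omega
    have hcntv2 : v2.countP (pvEligB b L) = 0 := by
      have : v.countP (pvEligB b L) = v1.countP (pvEligB b L) + 1 + v2.countP (pvEligB b L) := by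
        rw [hv, List.countP_append, List.countP_cons]
        simp [hm]
        omega
      omega
    refine ⟨L + 1, [], pvRels, by simp, ?_, ?_⟩
    · refine ⟨?_, le_refl 0, ?_⟩
      · rw [pv_cost_succ]
        simp only [List.countP_nil]
        push_cast
        omega
      · have hmono : pvElig b L ≤ pvElig b (L + 1) := by
          apply List.countP_mono_left
          intro x _ hx
          have : b x ≤ L := of_decide_eq_true hx
          exact decide_eq_true (by omega)
        have : 0 < pvElig b L := by omega
        simp only [List.countP_nil]
        exact_mod_cast (by omega : 0 < pvElig b (L + 1))
    · rw [hstep]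
      congr 1
      have hv2map : v2.map (pvPlain b L) = v2.map (pvPlain b (L + 1)) := by
        apply List.map_congr_left
        intro x hx
        have hxe : ¬ b x ≤ L := by
          have := List.countP_eq_zero.1 hcntv2 x hx
          simpa [pvEligB] using this
        unfold pvPlain
        rw [if_neg hxe]
        by_cases h2 : b x ≤ L + 1
        · rw [if_pos h2]
          have : L + 1 - b x = 0 := by omega
          rw [this]
        · rw [if_neg h2]
      rw [hv1map, hmmap, hv2map, huv, hv]
      simp

lemma pv_iter_succ {α : Type} (F : α → α) (n : Nat) (t : α) :
    pvIter F (n + 1) t = F (pvIter F n t) := by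
  induction n generalizing t with
  | zero => rfl
  | succ k ih =>
    show pvIter F (k + 1) (F t) = F (pvIter F (k + 1) t)
    rw [ih (F t)]
    rfl

lemma pv_A_iter (counts : List (String × Int)) (n : Nat) :
    ∃ L u v, pvRels = u ++ v ∧
      pvValid (pvB counts) n L (u.countP (pvEligB (pvB counts) L) : Int) ∧
      pvIter (pvStepA counts) n ⟨pvRels.map (fun r => (r, (0 : Int)))⟩
        = ⟨u.map (pvPlain (pvB counts) (L + 1)) ++ v.map (pvPlain (pvB counts) L)⟩ := by
  set b := pvB counts with hbdef
  induction n with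
  | zero =>
    obtain ⟨L, hcost, helig⟩ := pv_base_level b
    refine ⟨L, [], pvRels, by simp, ⟨by simpa using hcost, le_refl 0, by simpa using (by exact_mod_cast helig : (0 : Int) < (pvElig b L : Int))⟩, ?_⟩
    show (⟨pvRels.map (fun r => (r, (0 : Int)))⟩ : PySem.Dict String Int) = ⟨[] ++ pvRels.map (pvPlain b L)⟩
    congr 1
    rw [List.nil_append]
    apply List.map_congr_left
    intro r hr
    unfold pvPlain
    have hterm : max (L - b r) 0 = 0 := by
      have h1 : ∀ x ∈ pvRels.map (fun r => max (L - b r) 0), (0 : Int) ≤ x := by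
        intro x hx
        obtain ⟨y, _, hy⟩ := List.mem_map.1 hx
        rw [← hy]; exact le_max_right _ _
      have h2 := List.single_le_sum h1 (max (L - b r) 0) (List.mem_map.2 ⟨r, hr, rfl⟩)
      unfold pvCost at hcost
      have h3 : (0:Int) ≤ max (L - b r) 0 := le_max_right _ _
      omega
    split_ifs with h
    · have : L - b r = 0 := by omega
      rw [this]
    · rfl
  | succ k ih =>
    obtain ⟨L, u, v, huv, hval, hstate⟩ := ih
    obtain ⟨L', u', v', huv', hval', hstep⟩ := pv_stepA counts k L u v huv (by exact_mod_cast hval)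
    refine ⟨L', u', v', huv', by exact_mod_cast hval', ?_⟩
    rw [pv_iter_succ, hstate, hstep]

-- ===== VERDICT (by name: the statement is the Claim_ definition above) =====
theorem common_sense_relation_targets_py_spec : Claim_equal_common_sense_relation_targets_py := by
  intro gap counts _dom
  unfold Spec_common_sense_relation_targets_py
  by_cases hgap : gap ≤ 0
  · unfold common_sense_relation_targets_py common_sense_relation_targets_py_alt
    rw [PySem.List.pyRange_one_eq_nil hgap]
    simp [hgap]
  · rw [not_le] at hgap
    unfold common_sense_relation_targets_py common_sense_relation_targets_py_alt
    rw [if_neg (not_le.2 hgap)]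
    set b := pvB counts with hbdef
    -- the zero-initialised dict computes to the literal association list
    have htargets0 : (pvRels.foldl (fun (d : PySem.Dict String Int) r => d.insert r 0) PySem.Dict.empty)
        = ⟨pvRels.map (fun r => (r, (0 : Int)))⟩ := by rfl
    simp only [htargets0]
    -- A's loop is an iteration of the step function
    have hg : gap = ((gap.toNat : Nat) : Int) := (Int.toNat_of_nonneg (by omega)).symm
    have hlenR : (PySem.List.pyRange 0 gap).length = gap.toNat := by
      rw [hg, PySem.List.pyRange_zero_natCast]
      simp
      omega
    rw [pv_foldl_const, hlenR]
    have hF : (fun (t : PySem.Dict String Int) =>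
        match PySem.List.min? pvRels (fun r => PySem.Dict.getD (⟨counts⟩ : PySem.Dict String Int) r 0 + t.getD r 0) with
        | some rel =>
          match t.get? rel with
          | some v => t.insert rel (v + 1)
          | none => t
        | none => t) = pvStepA counts := by
      funext t
      unfold pvStepA
      rfl
    rw [hF]
    obtain ⟨LA, u, v, huv, hvalA, hstate⟩ := pv_A_iter counts gap.toNat
    rw [hstate]
    -- B's level search is valid
    obtain ⟨j, pre, LB, heq, hvalB⟩ := pv_B_valid counts gap hgap
    have hbase : (pvRels.map (fun r => PySem.Dict.getD (⟨counts⟩ : PySem.Dict String Int) r 0)) = pvRels.map (pvB counts) := rfl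
    rw [hbase, heq]
    -- B's output fold
    have hBf := pv_B_fold counts LB pvRels [] (gap - ((j : Int) * LB - pre)) (by simp) (by decide)
    rw [List.nil_append] at hBf
    simp only [] at hBf ⊢
    rw [hBf]
    -- both sides are the canonical allocation: (L, q) is unique
    rw [← hg] at hvalA
    obtain ⟨hLL, hqq⟩ := pv_valid_unique (pvB counts) hvalA hvalB
    rw [← hqq, ← hLL, huv, pv_pieces_split]
    simp [PySem.Dict.items]
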